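-- pv_equiv track=rewrite | github.com/MrBrantCode/unitest_baseline | mut_generate/mist_train_cf/cf_2092/solution.py | absolute_difference
-- ===== SOURCE A (Python) =====
-- def absolute_difference(n):
--     original = n
--     reverse = 0
--     while n > 0:
--         last_digit = n % 10
--         reverse = reverse * 10 + last_digit
--         n = n // 10
--     return abs(original - reverse)
-- ===== SOURCE B (Python) =====
-- def absolute_difference(n):
--     if n <= 0:
--         return abs(n)
--     reverse = sum(int(c) * 10 ** i for i, c in enumerate(str(n)))
--     return abs(n - reverse)
-- ===== Notes on version B (the rewrite author's own statement) =====
-- stated objective: alternative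
-- what changed: Replaces A's %/// Horner accumulation loop with a positional sum over the decimal string: since str(n) lists digits most-significant first, the digit at index i carries weight 10^i in the reversal, so reverse = sum(int(c)*10**i for i, c in enumerate(str(n))).
import Mathlib
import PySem

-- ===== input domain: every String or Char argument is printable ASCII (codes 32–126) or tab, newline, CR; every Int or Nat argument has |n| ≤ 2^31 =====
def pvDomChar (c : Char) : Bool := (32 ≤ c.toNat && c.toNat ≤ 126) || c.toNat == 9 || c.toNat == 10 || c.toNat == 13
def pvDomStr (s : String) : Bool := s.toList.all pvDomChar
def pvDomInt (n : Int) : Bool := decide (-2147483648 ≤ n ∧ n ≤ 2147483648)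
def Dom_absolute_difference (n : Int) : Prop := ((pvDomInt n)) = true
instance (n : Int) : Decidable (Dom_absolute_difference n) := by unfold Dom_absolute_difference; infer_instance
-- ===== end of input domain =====

-- B replaces A's %-and-// Horner loop by a positional sum over the decimal string:
-- str(n) lists digits most-significant first, so the digit at index i carries weight 10^i
-- in the reversal; same O(#digits) cost, a different (string/positional) algorithm.

-- ===== PORT A =====
-- the 'while n > 0' loop of A, state (n, reverse)
def absDiffLoop (n acc : Int) : Int :=
  if h : n > 0 then
    absDiffLoop (PySem.Int.floordiv n 10) (acc * 10 + PySem.Int.mod n 10)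
  else acc
termination_by n.toNat
decreasing_by
  rw [PySem.Int.floordiv_eq_ediv_of_pos (by omega)]
  omega

def absolute_difference (n : Int) : Int :=
  let original := n
  let reverse := absDiffLoop n 0
  |original - reverse|

-- ===== PORT B =====
-- int(c) for a one-character digit string is ofChars? [c] (never none for a digit char,
-- so .getD 0 is never the default); 10 ** i has i ≥ 0 here, ported as 10 ^ i.toNat.
def absolute_difference_alt (n : Int) : Int :=
  if n ≤ 0 then |n|
  else
    let reverse :=
      ((PySem.List.enumerate (PySem.Int.toStr n).toList 0).map
        (fun ic => (PySem.Int.ofChars? [ic.2]).getD 0 * 10 ^ ic.1.toNat)).sum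
    |n - reverse|

-- ===== PRECONDITION & SPEC =====
def Spec_absolute_difference (n : Int) (out : Int) : Prop := out = absolute_difference_alt n
instance (n : Int) (out : Int) : Decidable (Spec_absolute_difference n out) := by unfold Spec_absolute_difference; infer_instance

-- ===== CLAIM (what is proved, stated in full; the proofs are below) =====
def Claim_equal_absolute_difference : Prop := ∀ (n : Int), Dom_absolute_difference n → Spec_absolute_difference n (absolute_difference n)

-- ===== LEMMAS AND PROOFS =====

-- one-step unfolding of `Nat.toDigitsCore`
lemma tdc_succ (f n : Nat) (acc : List Char) :
    Nat.toDigitsCore 10 (f + 1) n acc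
      = if n / 10 = 0 then Nat.digitChar (n % 10) :: acc
        else Nat.toDigitsCore 10 f (n / 10) (Nat.digitChar (n % 10) :: acc) := rfl

-- `Nat.toDigitsCore` appends to its accumulator
lemma tdc_acc (f : Nat) : ∀ (n : Nat) (acc : List Char),
    Nat.toDigitsCore 10 f n acc = Nat.toDigitsCore 10 f n [] ++ acc := by
  induction f with
  | zero => intro n acc; simp [Nat.toDigitsCore]
  | succ f ih =>
    intro n acc
    rw [tdc_succ, tdc_succ]
    by_cases h : n / 10 = 0
    · simp [h]
    · simp only [h, if_false]
      rw [ih (n / 10) (Nat.digitChar (n % 10) :: acc), ih (n / 10) [Nat.digitChar (n % 10)]]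
      simp

-- fuel irrelevance for `Nat.toDigitsCore` (enough fuel)
lemma tdc_fuel : ∀ (n f : Nat) (acc : List Char), n ≤ f →
    Nat.toDigitsCore 10 (f + 1) n acc = Nat.toDigitsCore 10 (n + 1) n acc := by
  intro n
  induction n using Nat.strong_induction_on with
  | _ n ih =>
    intro f acc hf
    rw [tdc_succ, tdc_succ]
    by_cases h : n / 10 = 0
    · simp [h]
    · simp only [h, if_false]
      have hn : 0 < n := by
        rcases Nat.eq_zero_or_pos n with h0 | h0
        · exact absurd (by simp [h0]) h
        · exact h0
      have hlt : n / 10 < n := Nat.div_lt_self hn (by norm_num)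
      obtain ⟨f', rfl⟩ : ∃ f', f = f' + 1 := ⟨f - 1, by omega⟩
      obtain ⟨n', rfl⟩ : ∃ n', n = n' + 1 := ⟨n - 1, by omega⟩
      rw [ih ((n' + 1) / 10) hlt f' _ (by omega), ih ((n' + 1) / 10) hlt n' _ (by omega)]

-- one step of `Nat.toDigits` for m ≥ 10
lemma toDigits_step (m : Nat) (h : 10 ≤ m) :
    Nat.toDigits 10 m = Nat.toDigits 10 (m / 10) ++ [Nat.digitChar (m % 10)] := by
  have h10 : m / 10 ≠ 0 := by omega
  unfold Nat.toDigits
  rw [tdc_succ m m []]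
  simp only [h10, if_false]
  rw [tdc_acc]
  obtain ⟨m', rfl⟩ : ∃ m', m = m' + 1 := ⟨m - 1, by omega⟩
  rw [tdc_fuel ((m' + 1) / 10) m' [] (by omega)]

lemma toDigits_small (m : Nat) (h : m < 10) :
    Nat.toDigits 10 m = [Nat.digitChar m] := by
  unfold Nat.toDigits
  rw [tdc_succ]
  simp [Nat.div_eq_of_lt h, Nat.mod_eq_of_lt h]

-- `Nat.toDigits` is the base-10 digit list, most significant first
lemma toDigits_eq_digits (m : Nat) (hm : 0 < m) :
    Nat.toDigits 10 m = ((Nat.digits 10 m).map Nat.digitChar).reverse := by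
  induction m using Nat.strong_induction_on with
  | _ m ih =>
    rw [Nat.digits_def' (by norm_num : 1 < 10) hm]
    by_cases h : m < 10
    · rw [toDigits_small m h]
      have : m / 10 = 0 := Nat.div_eq_of_lt h
      simp [this, Nat.mod_eq_of_lt h]
    · rw [toDigits_step m (by omega)]
      have hpos : 0 < m / 10 := Nat.div_pos (by omega) (by norm_num)
      rw [ih (m / 10) (Nat.div_lt_self hm (by norm_num)) hpos]
      simp

-- int(c) of a single decimal digit character
lemma digit_val (d : Nat) (hd : d < 10) :
    (PySem.Int.ofChars? [Nat.digitChar d]).getD 0 = (d : Int) := by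
  interval_cases d <;> decide

-- enumerate over a snoc
lemma enumerate_snoc {α : Type} (c : α) : ∀ (cs : List α) (s : Int),
    PySem.List.enumerate (cs ++ [c]) s
      = PySem.List.enumerate cs s ++ [(s + cs.length, c)] := by
  intro cs
  induction cs with
  | nil => intro s; simp [PySem.List.enumerate_nil, PySem.List.enumerate_cons]
  | cons x xs ih =>
    intro s
    simp only [List.cons_append, PySem.List.enumerate_cons, ih (s + 1)]
    simp
    ring_nf

-- B's positional sum over the reversed digit-character list equals A's Horner fold
lemma sum_enum_eq_horner : ∀ (ds : List Nat) (acc : Int), (∀ d ∈ ds, d < 10) →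
    ((PySem.List.enumerate ((ds.map Nat.digitChar).reverse) 0).map
        (fun ic => (PySem.Int.ofChars? [ic.2]).getD 0 * 10 ^ ic.1.toNat)).sum
      + acc * 10 ^ ds.length
      = ds.foldl (fun (a : Int) (d : Nat) => a * 10 + (d : Int)) acc := by
  intro ds
  induction ds with
  | nil => intro acc _; simp [PySem.List.enumerate_nil]
  | cons e ds ih =>
    intro acc hlt
    have he : e < 10 := hlt e (List.mem_cons_self ..)
    have hds : ∀ d ∈ ds, d < 10 := fun d hd => hlt d (List.mem_cons_of_mem _ hd)
    simp only [List.map_cons, List.reverse_cons]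
    rw [enumerate_snoc]
    simp only [List.map_append, List.sum_append, List.map_cons, List.map_nil,
      List.sum_cons, List.sum_nil]
    have hlen : ((ds.map Nat.digitChar).reverse).length = ds.length := by simp
    rw [hlen]
    have htn : ((0 : Int) + (ds.length : Int)).toNat = ds.length := by simp
    rw [htn, digit_val e he]
    rw [List.foldl_cons, ← ih (acc * 10 + e) hds]
    rw [List.length_cons, pow_succ]
    ring

-- A's loop is the Horner fold over the base-10 digits, least significant first
lemma loop_eq_foldl : ∀ (m : Nat) (acc : Int),
    absDiffLoop (m : Int) acc = (Nat.digits 10 m).foldl (fun (a : Int) (d : Nat) => a * 10 + (d : Int)) acc := by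
  intro m
  induction m using Nat.strong_induction_on with
  | _ m ih =>
    intro acc
    by_cases hm : 0 < m
    · rw [absDiffLoop]
      simp only [show ((m : Int) > 0) from by exact_mod_cast hm, dif_pos]
      have h1 : PySem.Int.floordiv (m : Int) 10 = ((m / 10 : Nat) : Int) := by
        exact_mod_cast PySem.Int.floordiv_natCast m 10
      have h2 : PySem.Int.mod (m : Int) 10 = ((m % 10 : Nat) : Int) := by
        exact_mod_cast PySem.Int.mod_natCast m 10
      rw [h1, h2]
      rw [ih (m / 10) (Nat.div_lt_self hm (by norm_num))]
      rw [Nat.digits_def' (by norm_num : 1 < 10) hm, List.foldl_cons]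
    · have : m = 0 := by omega
      subst this
      rw [absDiffLoop]
      simp

-- the loop does nothing for non-positive n
lemma loop_nonpos (n : Int) (h : ¬ n > 0) (acc : Int) : absDiffLoop n acc = acc := by
  rw [absDiffLoop]; simp [h]

-- ===== VERDICT (by name: the statement is the Claim_ definition above) =====
theorem absolute_difference_spec : Claim_equal_absolute_difference := by
  intro n _
  unfold Spec_absolute_difference absolute_difference absolute_difference_alt
  by_cases hn : n ≤ 0
  · rw [loop_nonpos n (by omega) 0]
    simp [hn]
  · simp only [hn, if_false]
    have hpos : 0 < n := by omega
    have hmpos : 0 < n.toNat := by omega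
    have hrepr : n = ((n.toNat : Nat) : Int) := by omega
    have hts : (PySem.Int.toStr n).toList = Nat.toDigits 10 n.toNat := by
      rw [PySem.Int.toList_toStr]
      simp [PySem.Int.toChars, show ¬ n < 0 by omega]
    rw [hts, toDigits_eq_digits n.toNat hmpos]
    have hsum := sum_enum_eq_horner (Nat.digits 10 n.toNat) 0
      (fun d hd => Nat.digits_lt_base (by norm_num) hd)
    simp only [zero_mul, add_zero] at hsum
    rw [hsum]
    conv_lhs => rw [hrepr]
    rw [loop_eq_foldl n.toNat 0, ← hrepr]
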